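-- pv_equiv track=rewrite | github.com/StructureFold/StructureFold | batch_folder.py | group_separate
-- ===== SOURCE A (Python) =====
-- def group_separate(id_sort, pro):
--     r = []
--     for i in range(pro):
--         r.append([])
--     for i in range(len(id_sort)):
--         t = id_sort[i][0]
--         g = i%pro
--         r[g].append(t)
--     return r
-- ===== SOURCE B (Python) =====
-- def group_separate(id_sort, pro):
--     n = len(id_sort)
--     return [[id_sort[j][0] for j in range(g, n, pro)] for g in range(pro)]
-- ===== Notes on version B (the rewrite author's own statement) =====
-- stated objective: alternative
-- what changed: Flips the loop nesting: instead of creating pro empty buckets and scattering each item into bucket i%pro, B builds each group directly as one strided slice range(g, n, pro), so there is no mutable bucket table at all.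
import Mathlib
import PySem

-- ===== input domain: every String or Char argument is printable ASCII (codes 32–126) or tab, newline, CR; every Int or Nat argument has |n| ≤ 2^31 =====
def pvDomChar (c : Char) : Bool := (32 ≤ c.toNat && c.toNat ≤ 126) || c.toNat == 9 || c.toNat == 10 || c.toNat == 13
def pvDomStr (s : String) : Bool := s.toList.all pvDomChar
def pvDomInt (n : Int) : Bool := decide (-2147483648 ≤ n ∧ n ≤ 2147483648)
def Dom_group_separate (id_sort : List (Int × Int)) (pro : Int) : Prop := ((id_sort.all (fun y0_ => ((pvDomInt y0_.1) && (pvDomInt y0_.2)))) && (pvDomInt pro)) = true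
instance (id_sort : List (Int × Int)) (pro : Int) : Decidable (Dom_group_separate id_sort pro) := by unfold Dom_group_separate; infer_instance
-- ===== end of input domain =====

-- B flips the loop nesting: each group is collected in one strided pass range(g, n, pro)
-- instead of scattering items into mutable buckets by i % pro (objective: alternative).

-- ===== PORT A =====
-- r[g].append(t): total guard; an out-of-range g (Python IndexError, only reachable for
-- pro < 0 with non-empty id_sort) is excluded by Pre_group_separate, so the guard never fires there.
def gsAppendAt (r : List (List Int)) (g : Int) (t : Int) : List (List Int) :=
  if 0 ≤ g ∧ g.toNat < r.length then r.set g.toNat (r.getD g.toNat [] ++ [t]) else r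

def group_separate (id_sort : List (Int × Int)) (pro : Int) : List (List Int) :=
  let r := (PySem.List.pyRange 0 pro 1).map (fun _ => ([] : List Int))
  (PySem.List.pyRange 0 (id_sort.length : Int) 1).foldl
    (fun r i =>
      let t := (PySem.List.pyGetD id_sort i (0, 0)).1
      gsAppendAt r (PySem.Int.mod i pro) t) r

-- ===== PORT B =====
def group_separate_alt (id_sort : List (Int × Int)) (pro : Int) : List (List Int) :=
  (PySem.List.pyRange 0 pro 1).map (fun g =>
    (PySem.List.pyRange g (id_sort.length : Int) pro).map
      (fun j => (PySem.List.pyGetD id_sort j (0, 0)).1))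

-- ===== PRECONDITION & SPEC =====
-- Pre_ excludes exactly the inputs on which A raises: pro = 0 with non-empty id_sort
-- (ZeroDivisionError at i % pro) and pro < 0 with non-empty id_sort (IndexError on r[g]).
def Pre_group_separate (id_sort : List (Int × Int)) (pro : Int) : Prop :=
  1 ≤ pro ∨ id_sort = []
instance (id_sort : List (Int × Int)) (pro : Int) : Decidable (Pre_group_separate id_sort pro) := by
  unfold Pre_group_separate; infer_instance
def pvWitness_group_separate : (List (Int × Int)) × Int := ([(1, 2), (3, 4), (5, 6)], 2)

def Spec_group_separate (id_sort : List (Int × Int)) (pro : Int) (out : List (List Int)) : Prop := out = group_separate_alt id_sort pro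
instance (id_sort : List (Int × Int)) (pro : Int) (out : List (List Int)) : Decidable (Spec_group_separate id_sort pro out) := by unfold Spec_group_separate; infer_instance

-- ===== CLAIM (what is proved, stated in full; the proofs are below) =====
def Claim_equal_group_separate : Prop := ∀ (id_sort : List (Int × Int)) (pro : Int), Dom_group_separate id_sort pro → Pre_group_separate id_sort pro → Spec_group_separate id_sort pro (group_separate id_sort pro)

-- ===== LEMMAS AND PROOFS =====

-- the value id_sort[j][0]
def gsVal (id_sort : List (Int × Int)) (j : Int) : Int :=
  (PySem.List.pyGetD id_sort j (0, 0)).1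

-- reference shape: bucket g of the first m items, as a filter of the index range
def gsRef (id_sort : List (Int × Int)) (p : Int) (m : Nat) : List (List Int) :=
  (PySem.List.pyRange 0 p 1).map (fun g =>
    ((PySem.List.pyRange 0 (m : Int) 1).filter (fun j => PySem.Int.mod j p == g)).map
      (gsVal id_sort))

-- a strided range with positive step equals the filter of the unit range by residue
lemma gsStride_eq_filter (p g n : Int) (hp : 0 < p) (hg0 : 0 ≤ g) (hgp : g < p) :
    PySem.List.pyRange g n p
      = (PySem.List.pyRange 0 n 1).filter (fun j => PySem.Int.mod j p == g) := by
  have pw1 : (PySem.List.pyRange g n p).Pairwise (· < ·) := by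
    rw [PySem.List.pyRange_of_pos _ _ hp]
    refine List.Pairwise.map _ ?_ List.pairwise_lt_range
    intro a b hab
    have : (a : Int) < (b : Int) := by exact_mod_cast hab
    nlinarith
  have pw2 : ((PySem.List.pyRange 0 n 1).filter (fun j => PySem.Int.mod j p == g)).Pairwise (· < ·) :=
    (PySem.List.pairwise_lt_pyRange_one 0 n).filter _
  have mem : ∀ x : Int, x ∈ PySem.List.pyRange g n p ↔
      x ∈ (PySem.List.pyRange 0 n 1).filter (fun j => PySem.Int.mod j p == g) := by
    intro x
    rw [PySem.List.mem_pyRange_iff_of_pos hp, List.mem_filter, PySem.List.mem_pyRange_one]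
    simp only [beq_iff_eq, PySem.Int.mod_eq_emod_of_pos hp]
    constructor
    · rintro ⟨h1, h2, k, hk⟩
      refine ⟨⟨by omega, h2⟩, ?_⟩
      have hx : x = g + p * k := by omega
      rw [hx, Int.add_mul_emod_self_left, Int.emod_eq_of_lt hg0 hgp]
    · rintro ⟨⟨h0, h2⟩, hm⟩
      have hdvd : p ∣ x - g := by
        have := Int.emod_def x p
        exact ⟨x / p, by omega⟩
      refine ⟨?_, h2, hdvd⟩
      by_cases hlt : x < g
      · exfalso
        rw [Int.emod_eq_of_lt h0 (by omega)] at hm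
        omega
      · omega
  have nd1 : (PySem.List.pyRange g n p).Nodup := pw1.imp ne_of_lt
  have nd2 : ((PySem.List.pyRange 0 n 1).filter (fun j => PySem.Int.mod j p == g)).Nodup :=
    pw2.imp ne_of_lt
  exact List.Perm.eq_of_pairwise (fun a b _ _ h1 h2 => le_antisymm h1 h2)
    (pw1.imp le_of_lt) (pw2.imp le_of_lt) ((List.perm_ext_iff_of_nodup nd1 nd2).2 mem)

-- the fold of A's scatter loop over the first m indices equals the reference shape
lemma gsFold_eq_ref (id_sort : List (Int × Int)) (p : Int) (hp : 0 < p) (m : Nat) :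
    (PySem.List.pyRange 0 (m : Int) 1).foldl
      (fun r i => gsAppendAt r (PySem.Int.mod i p) (gsVal id_sort i))
      ((PySem.List.pyRange 0 p 1).map (fun _ => ([] : List Int)))
      = gsRef id_sort p m := by
  induction m with
  | zero =>
      simp [gsRef, PySem.List.pyRange_one_eq_nil (le_refl (0 : Int))]
  | succ m ih =>
      have hcast : ((m + 1 : Nat) : Int) = (m : Int) + 1 := by push_cast; ring
      rw [hcast, PySem.List.pyRange_one_succ_right (by positivity), List.foldl_append, ih]
      simp only [List.foldl_cons, List.foldl_nil]
      -- now: gsAppendAt (gsRef id_sort p m) (mod ↑m p) (gsVal id_sort ↑m) = gsRef id_sort p (m+1)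
      have hmod : PySem.Int.mod (m : Int) p = (m : Int) % p := PySem.Int.mod_eq_emod_of_pos hp
      have hg0 : 0 ≤ (m : Int) % p := Int.emod_nonneg _ (ne_of_gt hp)
      have hgp : (m : Int) % p < p := Int.emod_lt_of_pos _ hp
      have hlenref : (gsRef id_sort p m).length = p.toNat := by
        simp [gsRef, PySem.List.length_pyRange_one]
      have hcond : 0 ≤ PySem.Int.mod (m : Int) p ∧
          (PySem.Int.mod (m : Int) p).toNat < (gsRef id_sort p m).length := by
        rw [hmod, hlenref]; omega
      rw [gsAppendAt, if_pos hcond]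
      apply List.ext_getElem
      · simp [gsRef, PySem.List.length_pyRange_one]
      · intro i hi1 hi2
        have hip : i < p.toNat := by
          simpa [hlenref] using hi1
        have hgetref : ∀ (k : Nat), (hk : k < p.toNat) → (gsRef id_sort p m)[k]'(by rw [hlenref]; exact hk)
            = ((PySem.List.pyRange 0 ((m : Nat) : Int) 1).filter
                (fun j => PySem.Int.mod j p == (k : Int))).map (gsVal id_sort) := by
          intro k hk
          have hk' : k < (PySem.List.pyRange 0 p 1).length := by
            rw [PySem.List.length_pyRange_one]; omega
          simp only [gsRef, List.getElem_map, PySem.List.getElem_pyRange_one _ _ _ hk', zero_add]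
        have hsucc : (PySem.List.pyRange 0 ((m : Int) + 1) 1)
            = PySem.List.pyRange 0 (m : Int) 1 ++ [(m : Int)] :=
          PySem.List.pyRange_one_succ_right (by positivity)
        have hrhs : (gsRef id_sort p (m + 1))[i]'hi2
            = ((PySem.List.pyRange 0 ((m : Nat) : Int) 1).filter
                (fun j => PySem.Int.mod j p == (i : Int))).map (gsVal id_sort)
              ++ (if PySem.Int.mod (m : Int) p == (i : Int) then [gsVal id_sort (m : Int)] else []) := by
          have hk' : i < (PySem.List.pyRange 0 p 1).length := by
            rw [PySem.List.length_pyRange_one]; omega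
          simp only [gsRef, List.getElem_map, PySem.List.getElem_pyRange_one _ _ _ hk', zero_add,
            hcast, hsucc, List.filter_append, List.map_append, List.filter_cons, List.filter_nil]
          by_cases hc : PySem.Int.mod (m : Int) p == (i : Int) <;> simp [hc]
        rw [hrhs, List.getElem_set]
        by_cases hcase : (PySem.Int.mod (m : Int) p).toNat = i
        · subst hcase
          have hkc : (((PySem.Int.mod (m : Int) p).toNat : Nat) : Int) = PySem.Int.mod (m : Int) p := by
            rw [hmod]; omega
          have heq : (PySem.Int.mod (m : Int) p == (((PySem.Int.mod (m : Int) p).toNat : Nat) : Int)) = true := by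
            simp [hkc]
          rw [if_pos rfl, heq, if_pos rfl]
          rw [List.getD_eq_getElem _ _ (by rw [hlenref, hmod]; omega),
              hgetref _ (by rw [hmod]; omega)]
        · have hne : (PySem.Int.mod (m : Int) p == (i : Int)) = false := by
            rw [hmod]; simp only [beq_eq_false_iff_ne, ne_eq]; omega
          rw [if_neg hcase, hne]
          simp only [Bool.false_eq_true, if_false, List.append_nil]
          exact hgetref i hip

-- ===== VERDICT (by name: the statement is the Claim_ definition above) =====
theorem group_separate_spec : Claim_equal_group_separate := by
  intro id_sort pro _ hpre
  unfold Spec_group_separate group_separate group_separate_alt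
  rcases hpre with hp | hnil
  · have hp' : (0 : Int) < pro := hp
    have hA := gsFold_eq_ref id_sort pro hp' id_sort.length
    simp only [gsVal] at hA
    rw [hA, gsRef]
    apply List.map_congr_left
    intro g hg
    rw [PySem.List.mem_pyRange_one] at hg
    rw [gsStride_eq_filter pro g _ hp' hg.1 hg.2]
    simp [gsVal]
  · subst hnil
    simp only [List.length_nil, Nat.cast_zero]
    rw [PySem.List.pyRange_one_eq_nil (le_refl (0 : Int))]
    simp only [List.foldl_nil]
    by_cases hp : (0 : Int) < pro
    · apply List.map_congr_left
      intro g hg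
      rw [PySem.List.mem_pyRange_one] at hg
      rw [gsStride_eq_filter pro g 0 hp hg.1 hg.2,
          PySem.List.pyRange_one_eq_nil (le_refl (0 : Int))]
      simp
    · rw [PySem.List.pyRange_one_eq_nil (by omega : pro ≤ (0 : Int))]
      simp
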